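-- pv_equiv track=rewrite | github.com/devseunggwan/praxis | hooks/side-effect-scan.py | has_prod_scope
-- ===== SOURCE A (Python) =====
-- PROD_LITERAL_TOKENS = {"prod", "production"}
--
-- def has_prod_scope(tokens: list[str]) -> bool:
--     for raw in tokens:
--         t = raw.lower()
--         if t in PROD_LITERAL_TOKENS:
--             return True
--         if t.startswith("--env=") and t.split("=", 1)[1] in PROD_LITERAL_TOKENS:
--             return True
--         if t.startswith("--environment=") and t.split("=", 1)[1] in PROD_LITERAL_TOKENS:
--             return True
--     # also: `--env prod` as two tokens
--     for i, raw in enumerate(tokens[:-1]):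
--         if raw.lower() in {"--env", "--environment", "-e"}:
--             if tokens[i + 1].lower() in PROD_LITERAL_TOKENS:
--                 return True
--     return False
-- ===== SOURCE B (Python) =====
-- PROD_LITERAL_TOKENS = {"prod", "production"}
--
-- _VALUE_FLAGS = ("--env", "--environment", "-e")
--
--
-- def _prod_assignment(t):
--     return (t.startswith("--env=") and t[6:] in PROD_LITERAL_TOKENS) or (
--         t.startswith("--environment=") and t[14:] in PROD_LITERAL_TOKENS
--     )
--
--
-- def has_prod_scope(tokens: list[str]) -> bool:
--     expecting = False  # previous token was a value-expecting env flag
--     for raw in tokens: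
--         t = raw.lower()
--         if (expecting and t in PROD_LITERAL_TOKENS) or t in PROD_LITERAL_TOKENS or _prod_assignment(t):
--             return True
--         expecting = t in _VALUE_FLAGS
--     return False
-- ===== Notes on version B (the rewrite author's own statement) =====
-- stated objective: simpler
-- what changed: Replaced A's two sequential passes (a literal/'--env='-assignment scan plus an enumerate-and-index pass over adjacent pairs) by one single pass that carries a boolean 'previous token was a value-expecting flag' state, and the split('=',1) suffix extraction by direct slicing after the checked prefix.
import Mathlib
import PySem

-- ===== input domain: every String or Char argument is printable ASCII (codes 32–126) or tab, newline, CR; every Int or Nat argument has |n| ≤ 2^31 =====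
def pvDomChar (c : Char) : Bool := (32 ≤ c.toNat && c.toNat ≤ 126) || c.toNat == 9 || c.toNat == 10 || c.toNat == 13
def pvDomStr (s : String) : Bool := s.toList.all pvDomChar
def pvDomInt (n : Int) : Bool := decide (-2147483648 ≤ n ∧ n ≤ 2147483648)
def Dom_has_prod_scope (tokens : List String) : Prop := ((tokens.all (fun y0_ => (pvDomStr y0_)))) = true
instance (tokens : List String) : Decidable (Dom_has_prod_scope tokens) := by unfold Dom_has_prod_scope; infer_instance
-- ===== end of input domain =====

-- B replaces A's two sequential passes by one single pass carrying a "previous token was a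
-- value-expecting flag" boolean; objective: simpler.

-- ===== PORT A =====
-- `t in PROD_LITERAL_TOKENS`
def pvAProd (t : String) : Bool := t == "prod" || t == "production"

-- `t.split("=", 1)[1]`; the index 1 is always in range at its call sites (t starts with "--env=" /
-- "--environment="), so the `.getD ""` defaults are never used.
def pvAEnvSuffix (t : String) : String :=
  (PySem.List.pyGet? ((PySem.Str.splitMax? t "=" 1).getD []) 1).getD ""

-- first `for raw in tokens:` loop
def pvALoop1 : List String → Bool
  | [] => false
  | raw :: rest =>
    let t := PySem.Str.lower raw
    if pvAProd t then true
    else if PySem.Str.startswith t "--env=" && pvAProd (pvAEnvSuffix t) then true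
    else if PySem.Str.startswith t "--environment=" && pvAProd (pvAEnvSuffix t) then true
    else pvALoop1 rest

-- `for i, raw in enumerate(tokens[:-1]): … tokens[i + 1] …` iterates exactly over the adjacent
-- pairs of the list, in order
def pvALoop2 : List String → Bool
  | raw :: next :: rest =>
    if PySem.Str.lower raw == "--env" || PySem.Str.lower raw == "--environment" ||
        PySem.Str.lower raw == "-e" then
      if pvAProd (PySem.Str.lower next) then true else pvALoop2 (next :: rest)
    else pvALoop2 (next :: rest)
  | _ => false

def has_prod_scope (tokens : List String) : Bool :=
  if pvALoop1 tokens then true else pvALoop2 tokens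

-- ===== PORT B =====
def pvBProd (t : String) : Bool := t == "prod" || t == "production"

def pvBFlag (t : String) : Bool := t == "--env" || t == "--environment" || t == "-e"

-- `_prod_assignment(t)`; Python `t[6:]` / `t[14:]` is exactly `toList.drop 6/14` for a
-- nonnegative start index.
def pvBAssign (t : String) : Bool :=
  (PySem.Str.startswith t "--env=" && pvBProd (String.ofList (t.toList.drop 6))) ||
  (PySem.Str.startswith t "--environment=" && pvBProd (String.ofList (t.toList.drop 14)))

def pvBGo : Bool → List String → Bool
  | _, [] => false
  | expecting, raw :: rest =>
    let t := PySem.Str.lower raw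
    if (expecting && pvBProd t) || pvBProd t || pvBAssign t then true
    else pvBGo (pvBFlag t) rest

def has_prod_scope_alt (tokens : List String) : Bool := pvBGo false tokens

-- ===== PRECONDITION & SPEC =====
def Spec_has_prod_scope (tokens : List String) (out : Bool) : Prop := out = has_prod_scope_alt tokens
instance (tokens : List String) (out : Bool) : Decidable (Spec_has_prod_scope tokens out) := by unfold Spec_has_prod_scope; infer_instance

-- ===== CLAIM (what is proved, stated in full; the proofs are below) =====
def Claim_equal_has_prod_scope : Prop := ∀ (tokens : List String), Dom_has_prod_scope tokens → Spec_has_prod_scope tokens (has_prod_scope tokens)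

-- ===== LEMMAS AND PROOFS =====

-- `splitOnMax.go` with exhausted maxsplit returns the remainder as the final piece, any fuel.
theorem pvGoZero (sep : List Char) (fuel : Nat) (l cur : List Char)
    (accs : List (List Char)) :
    PySem.Chars.splitOnMax.go sep fuel 0 l cur accs = ((cur.reverse ++ l) :: accs).reverse := by
  cases fuel <;> cases l <;> simp [PySem.Chars.splitOnMax.go]

-- under `t.startswith("--env=")`, `t.split("=", 1)[1]` is `t[6:]`
theorem pvSuffixEnv (t : String) (h : PySem.Str.startswith t "--env=" = true) :
    pvAEnvSuffix t = String.ofList (t.toList.drop 6) := by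
  simp only [PySem.Str.startswith_eq] at h
  rw [PySem.Chars.startswith_iff] at h
  obtain ⟨r, hr⟩ := h
  have hr' : t.toList = '-'::'-'::'e'::'n'::'v'::'='::r := by simpa using hr.symm
  simp [pvAEnvSuffix, PySem.Str.splitMax?, PySem.Chars.splitMax?, hr',
    PySem.Chars.splitOnMax, PySem.Chars.splitOnMax.go, List.isPrefixOf, pvGoZero,
    PySem.List.pyGet?, PySem.List.pyIdx?]

-- under `t.startswith("--environment=")`, `t.split("=", 1)[1]` is `t[14:]`
theorem pvSuffixEnvironment (t : String)
    (h : PySem.Str.startswith t "--environment=" = true) :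
    pvAEnvSuffix t = String.ofList (t.toList.drop 14) := by
  simp only [PySem.Str.startswith_eq] at h
  rw [PySem.Chars.startswith_iff] at h
  obtain ⟨r, hr⟩ := h
  have hr' : t.toList = '-'::'-'::'e'::'n'::'v'::'i'::'r'::'o'::'n'::'m'::'e'::'n'::'t'::'='::r := by
    simpa using hr.symm
  simp [pvAEnvSuffix, PySem.Str.splitMax?, PySem.Chars.splitMax?, hr',
    PySem.Chars.splitOnMax, PySem.Chars.splitOnMax.go, List.isPrefixOf, pvGoZero,
    PySem.List.pyGet?, PySem.List.pyIdx?]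

-- a token cannot start with both prefixes (they differ at index 5)
theorem pvNotBoth (t : String) (h : PySem.Str.startswith t "--env=" = true) :
    PySem.Str.startswith t "--environment=" = false := by
  rw [Bool.eq_false_iff]
  intro h2
  simp only [PySem.Str.startswith_eq] at h h2
  rw [PySem.Chars.startswith_iff] at h h2
  obtain ⟨r1, hr1⟩ := h
  obtain ⟨r2, hr2⟩ := h2
  rw [← hr1] at hr2
  simp at hr2

-- A's two assignment branches, combined, equal B's `_prod_assignment`.
theorem pvAssignEq (t : String) :
    (PySem.Str.startswith t "--env=" && pvAProd (pvAEnvSuffix t) ||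
     PySem.Str.startswith t "--environment=" && pvAProd (pvAEnvSuffix t)) = pvBAssign t := by
  cases h1 : PySem.Str.startswith t "--env=" with
  | true =>
    have h2 := pvNotBoth t h1
    rw [pvSuffixEnv t h1]
    have h1' := h1; have h2' := h2
    simp at h1' h2'
    simp [pvBAssign, h1', h2', pvAProd, pvBProd]
  | false =>
    cases h2 : PySem.Str.startswith t "--environment=" with
    | true =>
      rw [pvSuffixEnvironment t h2]
      have h1' := h1; have h2' := h2
      simp at h1' h2'
      simp [pvBAssign, h1', h2', pvAProd, pvBProd]
    | false =>
      have h1' := h1; have h2' := h2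
      simp at h1' h2'
      simp [pvBAssign, h1', h2']

theorem pvIteOr (b x : Bool) : (if b then true else x) = (b || x) := by cases b <;> simp

theorem pvIteAnd (b p l : Bool) : (if b then (p || l) else l) = ((b && p) || l) := by
  cases b <;> simp

theorem pvBProdEq (t : String) : pvBProd t = pvAProd t := rfl

-- one-step unfoldings of the three loops into flat disjunctions
theorem pvALoop1Cons (raw : String) (rest : List String) :
    pvALoop1 (raw :: rest) =
      (pvAProd (PySem.Str.lower raw) || pvBAssign (PySem.Str.lower raw) || pvALoop1 rest) := by
  simp only [pvALoop1, pvIteOr, ← pvAssignEq, Bool.or_assoc]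

theorem pvALoop2Cons (raw nxt : String) (rest : List String) :
    pvALoop2 (raw :: nxt :: rest) =
      ((pvBFlag (PySem.Str.lower raw) && pvAProd (PySem.Str.lower nxt)) ||
        pvALoop2 (nxt :: rest)) := by
  simp only [pvALoop2, pvBFlag, pvIteOr, pvIteAnd]

theorem pvBGoCons (e : Bool) (raw : String) (rest : List String) :
    pvBGo e (raw :: rest) =
      ((e && pvAProd (PySem.Str.lower raw)) || pvAProd (PySem.Str.lower raw) ||
        pvBAssign (PySem.Str.lower raw) || pvBGo (pvBFlag (PySem.Str.lower raw)) rest) := by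
  simp only [pvBGo, pvIteOr, pvBProdEq, Bool.or_assoc]

-- head-of-list production check (spec-side helper for the loop invariant)
def pvHeadProd : List String → Bool
  | [] => false
  | a :: _ => pvAProd (PySem.Str.lower a)

-- loop invariant: B's single pass equals "pending-flag match ∨ A's pass 1 ∨ A's pass 2"
theorem pvBGoEq (ts : List String) (e : Bool) :
    pvBGo e ts = ((e && pvHeadProd ts) || pvALoop1 ts || pvALoop2 ts) := by
  induction ts generalizing e with
  | nil => simp [pvBGo, pvALoop1, pvALoop2, pvHeadProd]
  | cons raw rest ih =>
    rw [pvBGoCons, pvALoop1Cons, ih]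
    cases rest with
    | nil =>
      simp [pvALoop2, pvHeadProd]
      simp [Bool.or_comm, Bool.or_left_comm]
    | cons nxt rest' =>
      rw [pvALoop2Cons]
      simp only [pvHeadProd]
      simp [Bool.or_comm, Bool.or_left_comm, Bool.or_assoc]

-- ===== VERDICT (by name: the statement is the Claim_ definition above) =====
theorem has_prod_scope_spec : Claim_equal_has_prod_scope := by
  intro tokens _
  unfold Spec_has_prod_scope has_prod_scope has_prod_scope_alt
  rw [pvBGoEq]
  cases h1 : pvALoop1 tokens <;> simp
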